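-- pv_equiv track=rewrite | github.com/Omnath-git/hereiam | utils/profile_generator.py | build_skills_section
-- ===== SOURCE A (Python) =====
-- def build_skills_section(skills):
--     if not skills:
--         return ''
--     expert = skills[:3]
--     advanced = skills[3:6] if len(skills) > 3 else []
--     rest = skills[6:] if len(skills) > 6 else []
--
--     html = ''.join([f'<span class="skill-item skill-level-expert"><i class="fas fa-star"></i> {s}</span>' for s in expert])
--     html += ''.join([f'<span class="skill-item skill-level-advanced"><i class="fas fa-check-circle"></i> {s}</span>' for s in advanced])
--     html += ''.join([f'<span class="skill-item">{s}</span>' for s in rest])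
--
--     return f'''
--     <div class="section-card" id="skills">
--         <h2 class="section-title"><i class="fas fa-cogs"></i> Skills & Expertise</h2>
--         <div class="skills-container">{html}</div>
--         <div style="margin-top:8px;display:flex;gap:12px;font-size:0.68rem;color:var(--secondary);">
--             <span><span class="skill-item skill-level-expert" style="font-size:0.65rem;padding:2px 8px;"><i class="fas fa-star"></i></span> Expert</span>
--             <span><span class="skill-item skill-level-advanced" style="font-size:0.65rem;padding:2px 8px;"><i class="fas fa-check-circle"></i></span> Advanced</span>
--         </div>
--     </div>'''
-- ===== SOURCE B (Python) =====
-- _LEVELS = [(' skill-level-expert', '<i class="fas fa-star"></i> ')] * 3 + \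
--           [(' skill-level-advanced', '<i class="fas fa-check-circle"></i> ')] * 3
--
--
-- def build_skills_section(skills):
--     if not skills:
--         return ''
--     it = iter(_LEVELS)
--     parts = []
--     for s in skills:
--         cls, icon = next(it, ('', ''))
--         parts.append(f'<span class="skill-item{cls}">{icon}{s}</span>')
--     html = ''.join(parts)
--     return f'''
--     <div class="section-card" id="skills">
--         <h2 class="section-title"><i class="fas fa-cogs"></i> Skills & Expertise</h2>
--         <div class="skills-container">{html}</div>
--         <div style="margin-top:8px;display:flex;gap:12px;font-size:0.68rem;color:var(--secondary);">
--             <span><span class="skill-item skill-level-expert" style="font-size:0.65rem;padding:2px 8px;"><i class="fas fa-star"></i></span> Expert</span>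
--             <span><span class="skill-item skill-level-advanced" style="font-size:0.65rem;padding:2px 8px;"><i class="fas fa-check-circle"></i></span> Advanced</span>
--         </div>
--     </div>'''
-- ===== Notes on version B (the rewrite author's own statement) =====
-- stated objective: alternative
-- what changed: Replaces A's three slice-based partitions each rendered by its own hard-coded template comprehension with a single data-driven pass: one generic template parameterized by (css-class, icon) pairs drawn in lockstep from a 6-entry level table via an iterator (empty pair once exhausted), collecting fragments into a list joined once.
import Mathlib
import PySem

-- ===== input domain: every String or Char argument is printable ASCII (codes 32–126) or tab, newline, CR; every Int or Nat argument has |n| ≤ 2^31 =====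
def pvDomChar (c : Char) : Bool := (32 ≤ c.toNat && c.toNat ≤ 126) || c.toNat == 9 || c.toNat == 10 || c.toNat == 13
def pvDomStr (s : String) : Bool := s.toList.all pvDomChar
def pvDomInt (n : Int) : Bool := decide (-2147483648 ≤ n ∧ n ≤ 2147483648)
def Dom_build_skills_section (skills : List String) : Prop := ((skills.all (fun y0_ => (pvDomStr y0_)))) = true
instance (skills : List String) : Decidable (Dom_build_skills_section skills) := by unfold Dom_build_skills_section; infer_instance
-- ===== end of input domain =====

-- B replaces A's three slice-based, hard-coded-template join passes with one data-driven
-- pass: a generic template filled from a 6-entry (class, icon) level table consumed in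
-- lockstep (empty pair once exhausted); alternative decomposition, same cost.

-- ===== PORT A =====
def pvExpertFrag (s : String) : String := "<span class=\"skill-item skill-level-expert\"><i class=\"fas fa-star\"></i> " ++ s ++ "</span>"
def pvAdvancedFrag (s : String) : String := "<span class=\"skill-item skill-level-advanced\"><i class=\"fas fa-check-circle\"></i> " ++ s ++ "</span>"
def pvPlainFrag (s : String) : String := "<span class=\"skill-item\">" ++ s ++ "</span>"
def pvTplPre : String := "\n    <div class=\"section-card\" id=\"skills\">\n        <h2 class=\"section-title\"><i class=\"fas fa-cogs\"></i> Skills & Expertise</h2>\n        <div class=\"skills-container\">"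
def pvTplPost : String := "</div>\n        <div style=\"margin-top:8px;display:flex;gap:12px;font-size:0.68rem;color:var(--secondary);\">\n            <span><span class=\"skill-item skill-level-expert\" style=\"font-size:0.65rem;padding:2px 8px;\"><i class=\"fas fa-star\"></i></span> Expert</span>\n            <span><span class=\"skill-item skill-level-advanced\" style=\"font-size:0.65rem;padding:2px 8px;\"><i class=\"fas fa-check-circle\"></i></span> Advanced</span>\n        </div>\n    </div>"

def build_skills_section (skills : List String) : String :=
  if skills = [] then "" else
    let expert := PySem.List.slice skills none (some 3)
    let advanced := if skills.length > 3 then PySem.List.slice skills (some 3) (some 6) else []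
    let rest := if skills.length > 6 then PySem.List.slice skills (some 6) none else []
    let html := PySem.Str.join "" (expert.map pvExpertFrag)
    let html := html ++ PySem.Str.join "" (advanced.map pvAdvancedFrag)
    let html := html ++ PySem.Str.join "" (rest.map pvPlainFrag)
    pvTplPre ++ html ++ pvTplPost

-- ===== PORT B =====
-- _LEVELS: three expert pairs then three advanced pairs
def pvEP : String × String := (" skill-level-expert", "<i class=\"fas fa-star\"></i> ")
def pvAP : String × String := (" skill-level-advanced", "<i class=\"fas fa-check-circle\"></i> ")
def pvLevels : List (String × String) := [pvEP, pvEP, pvEP, pvAP, pvAP, pvAP]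

-- the generic f-string template f'<span class="skill-item{cls}">{icon}{s}</span>'
def pvGFrag (p : String × String) (s : String) : String :=
  "<span class=\"skill-item" ++ p.1 ++ "\">" ++ p.2 ++ s ++ "</span>"

-- next(it, ('', '')) on the level iterator
def pvNextLevel : List (String × String) → String × String
  | [] => ("", "")
  | p :: _ => p

-- 'for s in skills: parts.append(template)' with the iterator state as the remaining levels
def pvLoopB : List String → List (String × String) → List String → List String
  | [], _, parts => parts
  | s :: rest, levels, parts => pvLoopB rest levels.tail (parts ++ [pvGFrag (pvNextLevel levels) s])

def build_skills_section_alt (skills : List String) : String :=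
  if skills = [] then "" else
    let html := PySem.Str.join "" (pvLoopB skills pvLevels [])
    pvTplPre ++ html ++ pvTplPost

-- ===== PRECONDITION & SPEC =====
def Spec_build_skills_section (skills : List String) (out : String) : Prop := out = build_skills_section_alt skills
instance (skills : List String) (out : String) : Decidable (Spec_build_skills_section skills out) := by unfold Spec_build_skills_section; infer_instance

-- ===== CLAIM =====
def Claim_equal_build_skills_section : Prop := ∀ (skills : List String), Dom_build_skills_section skills → Spec_build_skills_section skills (build_skills_section skills)

-- ===== LEMMAS AND PROOFS =====

theorem pv_join_cons (a : String) (l : List String) :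
    PySem.Str.join "" (a :: l) = a ++ PySem.Str.join "" l := by
  cases l with
  | nil => simp [PySem.Str.join, PySem.Chars.join_nil, PySem.Chars.join_singleton]
  | cons b t => simp [PySem.Str.join, PySem.Chars.join_cons_cons]

theorem pv_join_nil : PySem.Str.join "" ([] : List String) = "" := by
  simp [PySem.Str.join, PySem.Chars.join_nil]

theorem pv_join_append (l1 l2 : List String) :
    PySem.Str.join "" (l1 ++ l2) = PySem.Str.join "" l1 ++ PySem.Str.join "" l2 := by
  induction l1 with
  | nil => simp [pv_join_nil]
  | cons a t ih => simp [pv_join_cons, ih, String.append_assoc]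

-- the loop's accumulator factors out
theorem pv_loopB_acc (xs : List String) :
    ∀ levels parts, pvLoopB xs levels parts = parts ++ pvLoopB xs levels [] := by
  induction xs with
  | nil => intro levels parts; simp [pvLoopB]
  | cons s t ih =>
    intro levels parts
    simp only [pvLoopB]
    rw [ih levels.tail (parts ++ [pvGFrag (pvNextLevel levels) s]),
        ih levels.tail ([] ++ [pvGFrag (pvNextLevel levels) s])]
    simp

-- once the level table is exhausted, every fragment uses the empty pair
theorem pv_loopB_nil (xs : List String) :
    pvLoopB xs [] [] = xs.map (pvGFrag ("", "")) := by
  induction xs with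
  | nil => simp [pvLoopB]
  | cons s t ih => rw [pvLoopB, pv_loopB_acc]; simp [pvNextLevel, ih]

-- a block of n equal levels emits n fragments of that level
theorem pv_loopB_replicate (n : Nat) (p : String × String) :
    ∀ (xs : List String) (ls : List (String × String)),
      pvLoopB xs (List.replicate n p ++ ls) [] =
        (xs.take n).map (pvGFrag p) ++ pvLoopB (xs.drop n) ls [] := by
  induction n with
  | zero => intro xs ls; simp
  | succ n ih =>
    intro xs ls
    cases xs with
    | nil => simp [pvLoopB]
    | cons s t =>
      rw [List.replicate_succ, List.cons_append, pvLoopB, pv_loopB_acc]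
      simp [pvNextLevel, ih t ls]

-- the generic template at each table entry is A's corresponding literal template
theorem pv_gfrag_ep : pvGFrag pvEP = pvExpertFrag := by
  funext s; rfl
theorem pv_gfrag_ap : pvGFrag pvAP = pvAdvancedFrag := by
  funext s; rfl
theorem pv_gfrag_plain : pvGFrag ("", "") = pvPlainFrag := by
  funext s; rfl

theorem pv_html_eq (skills : List String) :
    PySem.Str.join "" (pvLoopB skills pvLevels []) =
      PySem.Str.join "" ((skills.take 3).map pvExpertFrag)
      ++ PySem.Str.join "" (((skills.drop 3).take 3).map pvAdvancedFrag)
      ++ PySem.Str.join "" (((skills.drop 3).drop 3).map pvPlainFrag) := by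
  have hlv : pvLevels = List.replicate 3 pvEP ++ (List.replicate 3 pvAP ++ []) := rfl
  rw [hlv, pv_loopB_replicate, pv_loopB_replicate, pv_loopB_nil,
      pv_gfrag_ep, pv_gfrag_ap, pv_gfrag_plain, pv_join_append, pv_join_append,
      String.append_assoc]

theorem pv_main (skills : List String) :
    build_skills_section skills = build_skills_section_alt skills := by
  by_cases hnil : skills = []
  · subst hnil; rfl
  · rw [build_skills_section, build_skills_section_alt, if_neg hnil, if_neg hnil,
      pv_html_eq skills]
    have hexp : PySem.List.slice skills none (some 3) = skills.take 3 := by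
      simp [pysem]
    have hadv : (if skills.length > 3 then PySem.List.slice skills (some 3) (some 6) else [])
        = (skills.drop 3).take 3 := by
      by_cases h3 : skills.length > 3
      · rw [if_pos h3]; simp [pysem]
      · rw [if_neg h3, List.drop_eq_nil_of_le (by omega)]; rfl
    have hrest : (if skills.length > 6 then PySem.List.slice skills (some 6) none else [])
        = (skills.drop 3).drop 3 := by
      rw [List.drop_drop]
      by_cases h6 : skills.length > 6
      · rw [if_pos h6]; simp [pysem]
      · rw [if_neg h6, List.drop_eq_nil_of_le (by omega)]
    rw [hexp, hadv, hrest]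

-- ===== VERDICT =====
theorem build_skills_section_spec : Claim_equal_build_skills_section := by
  intro skills _
  unfold Spec_build_skills_section
  exact pv_main skills
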